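-- pv_equiv track=rewrite | github.com/OliverOnForge/vecswap | swaper/tools.py | reflect_on_axis
-- ===== SOURCE A (Python) =====
-- def reflect_on_axis(vector: list, axis_index: int):
--     """
--     Swaps elements around a specific index (axis) acting as a pivot.
--     """
--     n = len(vector)
--     dist_to_start = axis_index
--     dist_to_end = (n - 1) - axis_index
--     radius = min(dist_to_start, dist_to_end)
--
--     for i in range(1, radius + 1):
--         left = axis_index - i
--         right = axis_index + i
--         vector[left], vector[right] = vector[right], vector[left]
--     return vector
-- ===== SOURCE B (Python) =====
-- def reflect_on_axis(vector: list, axis_index: int):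
--     """
--     Swaps elements around a specific index (axis) acting as a pivot,
--     by reversing the contiguous symmetric block in place (return value
--     and in-place mutation both match the pairwise-swap version).
--     """
--     radius = min(axis_index, (len(vector) - 1) - axis_index)
--     if radius < 1:
--         return vector
--     start = axis_index - radius
--     stop = axis_index + radius + 1
--     vector[start:stop] = vector[start:stop][::-1]
--     return vector
-- ===== Notes on version B (the rewrite author's own statement) =====
-- stated objective: simpler
-- what changed: B replaces A's pairwise outward swap loop with a single in-place reversal of the contiguous symmetric block around the axis (no-op when the radius is non-positive).
import Mathlib
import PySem

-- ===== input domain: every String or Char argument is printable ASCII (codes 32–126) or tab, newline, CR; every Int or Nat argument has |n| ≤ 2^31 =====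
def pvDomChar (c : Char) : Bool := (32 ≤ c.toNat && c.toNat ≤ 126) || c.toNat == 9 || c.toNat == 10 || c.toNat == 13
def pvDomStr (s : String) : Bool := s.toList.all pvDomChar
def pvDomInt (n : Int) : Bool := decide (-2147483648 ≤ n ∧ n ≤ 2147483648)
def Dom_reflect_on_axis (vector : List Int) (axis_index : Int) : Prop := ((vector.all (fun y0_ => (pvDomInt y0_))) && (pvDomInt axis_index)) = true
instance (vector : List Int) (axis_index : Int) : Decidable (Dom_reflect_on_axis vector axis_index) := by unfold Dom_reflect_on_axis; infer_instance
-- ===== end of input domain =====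

-- B reframes A's pairwise outward swap loop as one in-place reversal of the
-- contiguous symmetric block around the axis; equivalence is about the return
-- value (both Pythons also mutate `vector` in place in the same way).

-- ===== PORT A =====
def reflect_on_axis (vector : List Int) (axis_index : Int) : List Int :=
  let n : Int := vector.length
  let dist_to_start := axis_index
  let dist_to_end := (n - 1) - axis_index
  let radius := min dist_to_start dist_to_end
  (PySem.List.pyRange 1 (radius + 1) 1).foldl
    (fun v i =>
      let left := axis_index - i
      let right := axis_index + i
      -- on every executed iteration 0 ≤ left ∧ right < n, so indexing is exact
      let tmpr := PySem.List.pyGetD v right 0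
      let tmpl := PySem.List.pyGetD v left 0
      (v.set left.toNat tmpr).set right.toNat tmpl)
    vector

-- ===== PORT B =====
def reflect_on_axis_alt (vector : List Int) (axis_index : Int) : List Int :=
  let radius := min axis_index ((vector.length : Int) - 1 - axis_index)
  if radius < 1 then vector
  else
    let start := axis_index - radius
    let stop := axis_index + radius + 1
    -- vector[start:stop] = vector[start:stop][::-1]
    PySem.List.slice vector (some 0) (some start)
      ++ (PySem.List.slice vector (some start) (some stop)).reverse
      ++ PySem.List.slice vector (some stop) (some (vector.length : Int))

-- ===== PRECONDITION & SPEC =====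
def Spec_reflect_on_axis (vector : List Int) (axis_index : Int) (out : List Int) : Prop := out = reflect_on_axis_alt vector axis_index
instance (vector : List Int) (axis_index : Int) (out : List Int) : Decidable (Spec_reflect_on_axis vector axis_index out) := by unfold Spec_reflect_on_axis; infer_instance

-- ===== CLAIM (what is proved, stated in full; the proofs are below) =====
def Claim_equal_reflect_on_axis : Prop := ∀ (vector : List Int) (axis_index : Int), Dom_reflect_on_axis vector axis_index → Spec_reflect_on_axis vector axis_index (reflect_on_axis vector axis_index)

-- ===== LEMMAS AND PROOFS =====

/-- Nat-index model of one iteration of A's loop body. -/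
def swapsStep (a : Nat) (w : List Int) (i : Nat) : List Int :=
  (w.set (a - i) (w.getD (a + i) 0)).set (a + i) (w.getD (a - i) 0)

/-- Nat-index model of A's whole loop: iterations i = 1 … k. -/
def swaps (v : List Int) (a : Nat) : Nat → List Int
  | 0 => v
  | k + 1 => swapsStep a (swaps v a k) (k + 1)

theorem swaps_length (v : List Int) (a k : Nat) : (swaps v a k).length = v.length := by
  induction k with
  | zero => rfl
  | succ k ih => simp [swaps, swapsStep, ih]

/-- Elementwise characterisation of the swap loop after k ≤ r iterations. -/
theorem swaps_getElem? (v : List Int) (a r : Nat) (hra : r ≤ a) (hrn : a + r < v.length) :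
    ∀ k ≤ r, ∀ j : Nat,
      (swaps v a k)[j]? = if a - k ≤ j ∧ j ≤ a + k ∧ j ≠ a then v[2 * a - j]? else v[j]? := by
  intro k
  induction k with
  | zero => intro _ j; simp [swaps]; omega
  | succ k ih =>
    intro hk j
    have ihk := ih (by omega)
    have hw : (swaps v a k).length = v.length := swaps_length v a k
    simp only [swaps, swapsStep, List.getElem?_set, List.length_set, hw]
    have hgr : (swaps v a k).getD (a + (k + 1)) 0 = v.getD (a + (k + 1)) 0 := by
      rw [List.getD_eq_getElem?_getD, List.getD_eq_getElem?_getD, ihk]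
      rw [if_neg (by omega)]
    have hgl : (swaps v a k).getD (a - (k + 1)) 0 = v.getD (a - (k + 1)) 0 := by
      rw [List.getD_eq_getElem?_getD, List.getD_eq_getElem?_getD, ihk]
      rw [if_neg (by omega)]
    rw [hgr, hgl, ihk]
    by_cases h1 : a + (k + 1) = j
    · rw [if_pos h1, if_pos (by omega), if_pos (by omega)]
      rw [List.getD_eq_getElem?_getD]
      have : 2 * a - j = a - (k + 1) := by omega
      rw [this]
      rw [List.getElem?_eq_getElem (by omega)]
      rfl
    · rw [if_neg h1]
      by_cases h2 : a - (k + 1) = j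
      · rw [if_pos h2, if_pos (by omega), if_pos (by omega)]
        rw [List.getD_eq_getElem?_getD]
        have : 2 * a - j = a + (k + 1) := by omega
        rw [this]
        rw [List.getElem?_eq_getElem (by omega)]
        rfl
      · rw [if_neg h2]
        by_cases h3 : a - k ≤ j ∧ j ≤ a + k ∧ j ≠ a
        · rw [if_pos h3, if_pos (by omega)]
        · rw [if_neg h3, if_neg (by omega)]

/-- A's Int-level fold equals the Nat-index model. -/
theorem foldA_eq_swaps (v : List Int) (a : Nat) (r : Nat) (hra : r ≤ a)
    (hrn : a + r < v.length) :
    (PySem.List.pyRange 1 ((r : Int) + 1) 1).foldl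
      (fun w i =>
        (w.set ((a : Int) - i).toNat (PySem.List.pyGetD w ((a : Int) + i) 0)).set
          ((a : Int) + i).toNat (PySem.List.pyGetD w ((a : Int) - i) 0))
      v = swaps v a r := by
  induction r with
  | zero => rw [PySem.List.pyRange_one_eq_nil (by omega)]; rfl
  | succ k ih =>
    have h1 : (1 : Int) ≤ (k : Int) + 1 := by omega
    have hc : ((k + 1 : Nat) : Int) + 1 = ((k : Int) + 1) + 1 := by push_cast; ring
    rw [hc, PySem.List.pyRange_one_succ_right h1, List.foldl_append, ih (by omega) (by omega)]
    simp only [List.foldl_cons, List.foldl_nil]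
    have hl : ((a : Int) - ((k : Int) + 1)).toNat = a - (k + 1) := by omega
    have hr : ((a : Int) + ((k : Int) + 1)).toNat = a + (k + 1) := by omega
    have hgr : PySem.List.pyGetD (swaps v a k) ((a : Int) + ((k : Int) + 1)) 0
        = (swaps v a k).getD (a + (k + 1)) 0 := by
      have : ((a : Int) + ((k : Int) + 1)) = ((a + (k + 1) : Nat) : Int) := by push_cast; ring
      rw [this, PySem.List.pyGetD_natCast]
    have hgl : PySem.List.pyGetD (swaps v a k) ((a : Int) - ((k : Int) + 1)) 0
        = (swaps v a k).getD (a - (k + 1)) 0 := by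
      have : ((a : Int) - ((k : Int) + 1)) = ((a - (k + 1) : Nat) : Int) := by
        push_cast [Nat.cast_sub (by omega : k + 1 ≤ a)]; ring
      rw [this, PySem.List.pyGetD_natCast]
    simp only [swaps, swapsStep]
    rw [hgr, hgl, hl, hr]

/-- Elementwise characterisation of the reversed middle block. -/
theorem blockRev_getElem? (v : List Int) (a r : Nat) (hr1 : 1 ≤ r) (hra : r ≤ a)
    (hrn : a + r < v.length) (j : Nat) :
    (v.take (a - r) ++ ((v.drop (a - r)).take (2 * r + 1)).reverse ++ v.drop (a + r + 1))[j]?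
      = if a - r ≤ j ∧ j ≤ a + r ∧ j ≠ a then v[2 * a - j]? else v[j]? := by
  have hlen : ((v.drop (a - r)).take (2 * r + 1)).length = 2 * r + 1 := by
    simp; omega
  rw [List.append_assoc, List.getElem?_append]
  by_cases h1 : j < (v.take (a - r)).length
  · simp at h1
    rw [if_pos (by simpa using h1), List.getElem?_take, if_pos (by omega),
      if_neg (by omega)]
  · simp at h1
    rw [if_neg (by simp; omega), List.getElem?_append]
    have htl : (v.take (a - r)).length = a - r := by simp; omega
    by_cases h2 : j ≤ a + r
    · rw [if_pos (by rw [List.length_reverse, hlen, htl]; omega)]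
      rw [List.getElem?_reverse (by rw [hlen, htl]; omega), hlen, htl]
      rw [List.getElem?_take, if_pos (by omega), List.getElem?_drop]
      by_cases h3 : j = a
      · rw [if_neg (by omega)]
        congr 1; omega
      · rw [if_pos (by omega)]
        congr 1; omega
    · rw [if_neg (by rw [List.length_reverse, hlen, htl]; omega)]
      rw [List.length_reverse, hlen, htl, List.getElem?_drop, if_neg (by omega)]
      congr 1; omega

/-- B's slice expression, rewritten into take/drop form. -/
theorem alt_eq_block (v : List Int) (a r : Nat) (hr1 : 1 ≤ r) (hra : r ≤ a)
    (hrn : a + r < v.length) :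
    PySem.List.slice v (some 0) (some ((a : Int) - r))
      ++ (PySem.List.slice v (some ((a : Int) - r)) (some ((a : Int) + r + 1))).reverse
      ++ PySem.List.slice v (some ((a : Int) + r + 1)) (some (v.length : Int))
    = v.take (a - r) ++ ((v.drop (a - r)).take (2 * r + 1)).reverse ++ v.drop (a + r + 1) := by
  rw [PySem.List.slice_toNat v (a := 0) (b := (a : Int) - r) (by omega) (by omega),
      PySem.List.slice_toNat v (a := (a : Int) - r) (b := (a : Int) + r + 1) (by omega) (by omega),
      PySem.List.slice_toNat v (a := (a : Int) + r + 1) (b := (v.length : Int)) (by omega) (by omega)]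
  have h1 : ((a : Int) - r).toNat = a - r := by omega
  have h2 : ((a : Int) + r + 1).toNat = a + r + 1 := by omega
  have h3 : ((v.length : Int)).toNat = v.length := by omega
  rw [h1, h2, h3]
  simp only [Int.toNat_zero, Nat.sub_zero, List.drop_zero]
  rw [show a + r + 1 - (a - r) = 2 * r + 1 by omega]
  rw [List.take_of_length_le (l := List.drop (a + r + 1) v) (i := v.length - (a + r + 1))
        (le_of_eq (by rw [List.length_drop]))]

theorem main_eq (v : List Int) (ax : Int) : reflect_on_axis v ax = reflect_on_axis_alt v ax := by
  unfold reflect_on_axis reflect_on_axis_alt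
  simp only []
  set radius := min ax ((v.length : Int) - 1 - ax) with hradius
  by_cases hneg : radius < 1
  · rw [if_pos hneg, PySem.List.pyRange_one_eq_nil (by omega), List.foldl_nil]
  · rw [if_neg hneg]
    rw [not_lt] at hneg
    have hm1 : radius ≤ ax := hradius ▸ min_le_left _ _
    have hm2 : radius ≤ (v.length : Int) - 1 - ax := hradius ▸ min_le_right _ _
    have hax0 : 0 ≤ ax := by omega
    obtain ⟨a, rfl⟩ : ∃ a : Nat, ax = (a : Int) := ⟨ax.toNat, (Int.toNat_of_nonneg hax0).symm⟩
    obtain ⟨r, hr⟩ : ∃ r : Nat, radius = (r : Int) :=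
      ⟨radius.toNat, (Int.toNat_of_nonneg (by omega)).symm⟩
    have hr1 : 1 ≤ r := by omega
    have hra : r ≤ a := by omega
    have hrn : a + r < v.length := by omega
    rw [hr]
    rw [foldA_eq_swaps v a r hra hrn]
    rw [alt_eq_block v a r hr1 hra hrn]
    apply List.ext_getElem?
    intro j
    rw [swaps_getElem? v a r hra hrn r (le_refl r) j, blockRev_getElem? v a r hr1 hra hrn j]

-- ===== VERDICT (by name: the statement is the Claim_ definition above) =====
theorem reflect_on_axis_spec : Claim_equal_reflect_on_axis := by
  intro v ax _
  exact main_eq v ax
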